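-- pv_equiv track=rewrite | github.com/Ahngyuho/JavaCodingTest | 알고리즘퍼즐68_예제파일/q62_02.py | enable
-- ===== SOURCE A (Python) =====
-- N = 5
--
-- MASK = (1 << (N * N)) - 1
--
-- move = [lambda m: (m >> 1) & 0b0111101111011110111101111,
--         lambda m: (m << N) & MASK,
--         lambda m: (m << 1) & 0b1111011110111101111011110,
--         lambda m: m >> N]
--
-- def enable(maze):
--   man = (1 << (N * N - 1)) & (MASK - maze)
--   while True:
--     next_man = man
--     for m in move:
--       next_man |= m(man)
--     next_man &= (MASK - maze)
--     if next_man & 1 == 1: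
--       return True
--     if man == next_man:
--       break
--     man = next_man
--   return False
-- ===== SOURCE B (Python) =====
-- # Same result as the bitmask fixed-point version, but by an explicit DFS over the
-- # decoded 5x5 grid: bit p of the maze is cell (p // 5, p % 5), walls are set bits
-- # of maze's low 25 bits (two's complement for negative mazes, as in the original's
-- # MASK - maze), start is cell 24, target is cell 0.
-- def enable(maze):
--     def is_free(p):
--         return (maze >> p) & 1 == 0
--     if not is_free(24):
--         return False
--     seen = {24}
--     stack = [24]
--     while stack:
--         p = stack.pop()
--         r, c = divmod(p, 5)
--         for nr, nc in ((r - 1, c), (r + 1, c), (r, c - 1), (r, c + 1)):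
--             if 0 <= nr < 5 and 0 <= nc < 5:
--                 q = nr * 5 + nc
--                 if is_free(q) and q not in seen:
--                     seen.add(q)
--                     stack.append(q)
--     return 0 in seen
-- ===== Notes on version B (the rewrite author's own statement) =====
-- stated objective: alternative
-- what changed: A runs a whole-board bitmask fixed-point iteration (OR of four shift/mask moves until the reachable-cell mask stops changing); B decodes the maze bitmask into a 5x5 grid wall test and does an explicit DFS from the start cell with a stack and a visited set, answering whether the goal cell was reached.
import Mathlib
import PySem

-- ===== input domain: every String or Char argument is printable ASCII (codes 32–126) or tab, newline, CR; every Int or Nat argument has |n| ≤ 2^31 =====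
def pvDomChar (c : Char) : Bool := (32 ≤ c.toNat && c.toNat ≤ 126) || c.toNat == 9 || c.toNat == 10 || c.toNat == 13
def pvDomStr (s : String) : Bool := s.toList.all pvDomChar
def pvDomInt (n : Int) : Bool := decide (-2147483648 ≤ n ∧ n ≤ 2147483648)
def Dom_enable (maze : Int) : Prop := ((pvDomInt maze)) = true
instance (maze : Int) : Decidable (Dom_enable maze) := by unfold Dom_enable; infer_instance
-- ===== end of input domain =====

-- B replaces the whole-board bitmask fixed-point iteration by an explicit DFS over the
-- decoded 5x5 grid with a stack and a visited set (objective: alternative, same task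
-- as an idiomatic graph search; not claimed faster).

-- ===== PORT A =====
-- module constants of Source A: N = 5, MASK = (1 << (N*N)) - 1, and the four `move` lambdas
def pyMASK : Int := (1 <<< 25) - 1
def move0 (m : Int) : Int := PySem.Int.band (m >>> 1) 0b0111101111011110111101111
def move1 (m : Int) : Int := PySem.Int.band (m <<< 5) pyMASK
def move2 (m : Int) : Int := PySem.Int.band (m <<< 1) 0b1111011110111101111011110
def move3 (m : Int) : Int := m >>> 5
def pyMove : List (Int → Int) := [move0, move1, move2, move3]

-- the `while True` loop; fuel 26 is never exhausted: `man` is a set of at most 25 cells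
-- that strictly grows on every iteration that neither returns nor breaks
def enableLoop (free : Int) : Nat → Int → Bool
  | 0, _ => false
  | fuel+1, man =>
    let next := PySem.Int.band (pyMove.foldl (fun nm mv => PySem.Int.bor nm (mv man)) man) free
    if PySem.Int.band next 1 == 1 then true
    else if man == next then false
    else enableLoop free fuel next

def enable (maze : Int) : Bool :=
  enableLoop (pyMASK - maze) 26 (PySem.Int.band ((1:Int) <<< 24) (pyMASK - maze))

-- ===== PORT B =====
-- (maze >> p) & 1 == 0; p = r*5+c with 0 ≤ r,c < 5 at every call site, so `.toNat` is exact
def isFreeB (maze : Int) (p : Int) : Bool := PySem.Int.band (maze >>> p.toNat) 1 == 0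

-- body of B's `for nr, nc in ...` loop: bounds test, then free-and-unseen test, then push+mark
def dfsUpd (maze : Int) (st : List Int × PySem.Set Int) (nrc : Int × Int) : List Int × PySem.Set Int :=
  if 0 ≤ nrc.1 ∧ nrc.1 < 5 ∧ 0 ≤ nrc.2 ∧ nrc.2 < 5 then
    if isFreeB maze (nrc.1 * 5 + nrc.2) && !(PySem.Set.contains st.2 (nrc.1 * 5 + nrc.2)) then
      (st.1 ++ [nrc.1 * 5 + nrc.2], PySem.Set.add st.2 (nrc.1 * 5 + nrc.2))
    else st
  else st

-- the `while stack:` loop; fuel 30 is never exhausted: each iteration pops one cell and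
-- every push adds a fresh cell to `seen`, which holds at most 25 distinct cells
def dfsLoop (maze : Int) : Nat → List Int → PySem.Set Int → Bool
  | 0, _, seen => PySem.Set.contains seen 0
  | fuel+1, stack, seen =>
    match stack.getLast? with
    | none => PySem.Set.contains seen 0
    | some p =>
      let r := PySem.Int.floordiv p 5
      let c := PySem.Int.mod p 5
      let st := [(r - 1, c), (r + 1, c), (r, c - 1), (r, c + 1)].foldl (dfsUpd maze) (stack.dropLast, seen)
      dfsLoop maze fuel st.1 st.2

def enable_alt (maze : Int) : Bool :=
  if !(isFreeB maze 24) then false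
  else dfsLoop maze 30 [24] (PySem.Set.ofList [24])

-- ===== PRECONDITION & SPEC =====
def Spec_enable (maze : Int) (out : Bool) : Prop := out = enable_alt maze
instance (maze : Int) (out : Bool) : Decidable (Spec_enable maze out) := by unfold Spec_enable; infer_instance

-- ===== CLAIM (what is proved, stated in full; the proofs are below) =====
def Claim_equal_enable : Prop := ∀ (maze : Int), Dom_enable maze → Spec_enable maze (enable maze)

-- ===== LEMMAS AND PROOFS =====

-- ---- Nat bit toolkit ----
theorem hi_bit_false {v : Nat} (hv : v < 33554432) {i : Nat} (hi : 25 ≤ i) : v.testBit i = false := by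
  apply Nat.testBit_lt_two_pow
  calc v < 2 ^ 25 := by omega
    _ ≤ 2 ^ i := Nat.pow_le_pow_right (by norm_num) hi

theorem mask25_bit (i : Nat) : (33554431 : Nat).testBit i = decide (i < 25) := by
  have : (33554431 : Nat) = 2 ^ 25 - 1 := by norm_num
  rw [this, Nat.testBit_two_pow_sub_one]

theorem disj_add (x : Nat) : ∀ y, x &&& y = 0 → x + y = x ||| y := by
  induction x using Nat.strong_induction_on with
  | _ x ih =>
    intro y h
    rcases Nat.eq_zero_or_pos x with hx | hx
    · subst hx; simp
    have h2 : x / 2 &&& y / 2 = 0 := by rw [← Nat.and_div_two, h]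
    have ihx := ih (x / 2) (Nat.div_lt_self hx (by norm_num)) (y / 2) h2
    have hb : ¬(x % 2 = 1 ∧ y % 2 = 1) := by
      rintro ⟨h1, h2'⟩
      have := congrArg (fun z => z.testBit 0) h
      simp [Nat.testBit_zero] at this
      omega
    have hx2 := Nat.div_add_mod x 2
    have hy2 := Nat.div_add_mod y 2
    have hdm := Nat.div_add_mod (x ||| y) 2
    have hd2 : (x ||| y) / 2 = x / 2 ||| y / 2 := Nat.or_div_two
    have t := congrArg (· = true) (Nat.testBit_or x y 0)
    simp only [Nat.testBit_zero, Bool.or_eq_true, decide_eq_true_eq, eq_iff_iff] at t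
    omega

theorem low25 (a b : Nat) (ha : a < 33554432) : a &&& b = a &&& (b % 33554432) := by
  apply Nat.eq_of_testBit_eq
  intro i
  have h32 : (33554432 : Nat) = 2 ^ 25 := by norm_num
  rw [h32]
  simp only [Nat.testBit_and, Nat.testBit_mod_two_pow]
  by_cases hi : i < 25
  · simp [hi]
  · simp [hi_bit_false ha (by omega : 25 ≤ i)]

theorem mask_compl (v : Nat) (hv : v < 33554432) : (33554431 : Nat) ^^^ v = 33554431 - v := by
  have hdisj : v &&& (33554431 ^^^ v) = 0 := by
    apply Nat.eq_of_testBit_eq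
    intro i
    simp only [Nat.testBit_and, Nat.testBit_xor, Nat.zero_testBit]
    by_cases hi : i < 25
    · cases hv' : v.testBit i <;> simp [mask25_bit, hi]
    · simp [hi_bit_false hv (by omega : 25 ≤ i)]
  have hor : v ||| (33554431 ^^^ v) = 33554431 := by
    apply Nat.eq_of_testBit_eq
    intro i
    simp only [Nat.testBit_or, Nat.testBit_xor]
    by_cases hi : i < 25
    · cases hv' : v.testBit i <;> simp [mask25_bit, hi]
    · simp [hi_bit_false hv (by omega : 25 ≤ i), mask25_bit, hi]
  have := disj_add v (33554431 ^^^ v) hdisj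
  omega

-- a < 2^25 splits into the part on v and the part on the complement of v
theorem split25 (a v : Nat) (ha : a < 33554432) (hv : v < 33554432) :
    a = (a &&& v) + (a &&& (33554431 - v)) := by
  rw [← mask_compl v hv]
  have hdisj : (a &&& v) &&& (a &&& (33554431 ^^^ v)) = 0 := by
    apply Nat.eq_of_testBit_eq
    intro i
    simp only [Nat.testBit_and, Nat.testBit_xor, Nat.zero_testBit]
    by_cases hi : i < 25
    · cases hv' : v.testBit i <;> simp [mask25_bit, hi]
    · simp [hi_bit_false hv (by omega : 25 ≤ i)]
  have hor : (a &&& v) ||| (a &&& (33554431 ^^^ v)) = a := by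
    apply Nat.eq_of_testBit_eq
    intro i
    simp only [Nat.testBit_or, Nat.testBit_and, Nat.testBit_xor]
    by_cases hi : i < 25
    · cases hv' : v.testBit i <;> cases ha' : a.testBit i <;> simp [mask25_bit, hi]
    · simp [hi_bit_false ha (by omega : 25 ≤ i)]
  have := disj_add (a &&& v) (a &&& (33554431 ^^^ v)) hdisj
  omega

-- KEY: a & t for a < 2^25 only sees t's low 25 bits (Python semantics, any sign of t)
theorem band_low (a : Nat) (t : Int) (ha : a < 33554432) :
    PySem.Int.band (↑a) t = ↑(a &&& (t.emod 33554432).toNat) := by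
  have hre : t.emod 33554432 = t % 33554432 := rfl
  unfold PySem.Int.band
  by_cases ht : 0 ≤ t
  · simp only [Int.toNat_natCast, if_pos (by positivity : (0:Int) ≤ (a:Int)), if_pos ht]
    have h1 : (t.emod 33554432).toNat = t.toNat % 33554432 := by rw [hre]; omega
    rw [h1, low25 a t.toNat ha]
  · simp only [Int.toNat_natCast, if_pos (by positivity : (0:Int) ≤ (a:Int)), if_neg ht]
    set u := (-t - 1).toNat with hudef
    have hut : (u : Int) = -t - 1 := by omega
    have hr : (↑(u % 33554432) : Int) = (u : Int) % 33554432 := by push_cast; rfl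
    have hv : (t.emod 33554432).toNat = 33554431 - u % 33554432 := by
      rw [hre]
      have h2 : (u % 33554432 : Nat) < 33554432 := Nat.mod_lt _ (by norm_num)
      omega
    rw [hv, low25 a u ha]
    have := split25 a (u % 33554432) ha (Nat.mod_lt _ (by norm_num))
    omega

-- ---- abstract Nat model shared by both proofs ----
def orAllN (m : Nat) : Nat :=
  m ||| ((m >>> 1) &&& 16236015) ||| ((m <<< 5) &&& 33554431) ||| ((m <<< 1) &&& 32472030) ||| (m >>> 5)

def stepN (f m : Nat) : Nat := orAllN m &&& f

def loopN (f : Nat) : Nat → Nat → Bool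
  | 0, _ => false
  | fuel+1, m =>
    let n := stepN f m
    if n &&& 1 == 1 then true
    else if m == n then false
    else loopN f fuel n

def clN (f m : Nat) : Nat := (stepN f)^[25] m

def fN (maze : Int) : Nat := ((33554431 - maze).emod 33554432).toNat

def pcN (m : Nat) : Nat := ((Finset.range 25).filter (fun i => m.testBit i = true)).card

def adjP (p i : Nat) : Prop :=
  (5 ≤ p ∧ i = p - 5) ∨ (p + 5 < 25 ∧ i = p + 5) ∨ (p % 5 ≠ 0 ∧ i = p - 1) ∨ (p % 5 ≠ 4 ∧ i = p + 1)

def clM (maze : Int) : Nat := clN (fN maze) (16777216 &&& fN maze)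

theorem fN_lt (maze : Int) : fN maze < 33554432 := by
  unfold fN
  have : (33554431 - maze).emod 33554432 = (33554431 - maze) % 33554432 := rfl
  omega

-- ---- port A computes the Nat loop on the low 25 bits of free ----
theorem orAllN_lt {m : Nat} (hm : m < 33554432) : orAllN m < 33554432 := by
  have h25 : (33554432:Nat) = 2 ^ 25 := by norm_num
  unfold orAllN
  rw [h25] at *
  apply Nat.or_lt_two_pow
  apply Nat.or_lt_two_pow
  apply Nat.or_lt_two_pow
  apply Nat.or_lt_two_pow
  · exact hm
  · exact lt_of_le_of_lt Nat.and_le_right (by norm_num)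
  · exact lt_of_le_of_lt Nat.and_le_right (by norm_num)
  · exact lt_of_le_of_lt Nat.and_le_right (by norm_num)
  · exact lt_of_le_of_lt (Nat.shiftRight_le m 5) hm

theorem orAll_cast (m : Nat) :
    pyMove.foldl (fun nm mv => PySem.Int.bor nm (mv ↑m)) ↑m = ↑(orAllN m) := by
  simp only [pyMove, List.foldl, move0, move1, move2, move3, orAllN]
  have e1 : ((m:Int) >>> 1) = ((m >>> 1 : Nat) : Int) := (Int.natCast_shiftRight m 1).symm
  have e2 : ((m:Int) <<< 5) = ((m <<< 5 : Nat) : Int) := (Int.natCast_shiftLeft m 5).symm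
  have e3 : ((m:Int) <<< 1) = ((m <<< 1 : Nat) : Int) := (Int.natCast_shiftLeft m 1).symm
  have e4 : ((m:Int) >>> 5) = ((m >>> 5 : Nat) : Int) := (Int.natCast_shiftRight m 5).symm
  have hmask : pyMASK = ((33554431 : Nat) : Int) := by decide
  have hc0 : (16236015 : Int) = ((16236015 : Nat) : Int) := by norm_num
  have hc2 : (32472030 : Int) = ((32472030 : Nat) : Int) := by norm_num
  rw [e1, e2, e3, e4, hmask, hc0, hc2]
  simp only [PySem.Int.band_natCast, PySem.Int.bor_natCast]

theorem enableLoop_eq (t : Int) : ∀ (fuel : Nat) (m : Nat), m < 33554432 →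
    enableLoop t fuel ↑m = loopN ((t.emod 33554432).toNat) fuel m := by
  intro fuel
  induction fuel with
  | zero => intro m _; rfl
  | succ fuel ih =>
    intro m hm
    simp only [enableLoop, loopN, orAll_cast m,
      band_low (orAllN m) t (orAllN_lt hm)]
    set f := (t.emod 33554432).toNat with hf
    set n := orAllN m &&& f with hn
    have hn25 : n < 33554432 := lt_of_le_of_lt Nat.and_le_left (orAllN_lt hm)
    have hb1 : PySem.Int.band (↑n) 1 = ((n &&& 1 : Nat) : Int) := by
      have h01 : (1:Int) = ((1:Nat):Int) := by norm_num
      rw [h01, PySem.Int.band_natCast]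
    rw [hb1]
    have he1 : ((((n &&& 1 : Nat) : Int)) == (1:Int)) = ((n &&& 1) == 1) := by
      apply Bool.eq_iff_iff.mpr
      simp only [beq_iff_eq]
      constructor <;> intro h <;> exact_mod_cast h
    have he2 : (((m:Int)) == ((n:Int))) = (m == n) := by
      apply Bool.eq_iff_iff.mpr
      simp only [beq_iff_eq]
      constructor <;> intro h <;> exact_mod_cast h
    rw [he1, he2, ih n hn25]
    simp only [stepN, ← hn]

theorem enable_eq_loopN (maze : Int) :
    enable maze = loopN (fN maze) 26 (16777216 &&& fN maze) := by
  unfold enable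
  have h1 : ((1:Int) <<< 24) = ((16777216 : Nat) : Int) := by decide
  have h2 : pyMASK = (33554431 : Int) := by decide
  rw [h1, h2, band_low 16777216 (33554431 - maze) (by norm_num)]
  rw [enableLoop_eq _ 26 _ (lt_of_le_of_lt Nat.and_le_left (by norm_num))]
  rfl

-- ---- fixed-point theory for the Nat loop ----
theorem step_sub_f (f m : Nat) : stepN f m &&& f = stepN f m := by
  simp [stepN]

theorem step_lt (f m : Nat) (hf : f < 33554432) : stepN f m < 33554432 :=
  lt_of_le_of_lt (Nat.and_le_right) hf

theorem sub_f_lt {f m : Nat} (hf : f < 33554432) (hm : m &&& f = m) : m < 33554432 :=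
  lt_of_le_of_lt (hm ▸ Nat.and_le_right) hf

theorem bit_of_sub_f {f m : Nat} (hm : m &&& f = m) {i : Nat} (hi : m.testBit i = true) :
    f.testBit i = true := by
  have := congrArg (fun z => z.testBit i) hm
  simp only [Nat.testBit_and] at this
  cases hfb : f.testBit i
  · rw [hfb, Bool.and_false] at this; rw [← this] at hi; exact absurd hi (by simp)
  · rfl

theorem step_incr (f m : Nat) (hm : m &&& f = m) (i : Nat) (hi : m.testBit i = true) :
    (stepN f m).testBit i = true := by
  simp [stepN, orAllN, Nat.testBit_and, Nat.testBit_or, hi, bit_of_sub_f hm hi]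

theorem pcN_le (m : Nat) : pcN m ≤ 25 := by
  unfold pcN
  calc ((Finset.range 25).filter _).card ≤ (Finset.range 25).card := Finset.card_filter_le _ _
    _ = 25 := Finset.card_range 25

theorem pcN_lt_of_ssub {m n : Nat} (hmn : ∀ i, m.testBit i = true → n.testBit i = true)
    (hne : m ≠ n) (hm : m < 33554432) (hn : n < 33554432) : pcN m < pcN n := by
  apply Finset.card_lt_card
  constructor
  · intro i hi
    simp only [Finset.mem_filter, Finset.mem_range] at *
    exact ⟨hi.1, hmn i hi.2⟩
  · intro hsub
    apply hne
    apply Nat.eq_of_testBit_eq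
    intro i
    by_cases hi : i < 25
    · cases hb : n.testBit i
      · cases hb' : m.testBit i
        · rfl
        · rw [← hb, hmn i hb']
      · have : i ∈ (Finset.range 25).filter (fun j => n.testBit j = true) := by
          simp [Finset.mem_filter, Finset.mem_range, hi, hb]
        have := hsub this
        simp only [Finset.mem_filter, Finset.mem_range] at this
        exact this.2
    · rw [hi_bit_false hm (by omega), hi_bit_false hn (by omega)]

theorem pcN_full {m : Nat} (hm : m < 33554432) (hpc : 25 ≤ pcN m) :
    ∀ i, i < 25 → m.testBit i = true := by
  intro i hi
  have : (Finset.range 25).filter (fun j => m.testBit j = true) = Finset.range 25 := by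
    apply Finset.eq_of_subset_of_card_le (Finset.filter_subset _ _)
    · rw [Finset.card_range]; exact hpc
  have h2 : i ∈ (Finset.range 25).filter (fun j => m.testBit j = true) := by
    rw [this]; exact Finset.mem_range.mpr hi
  simp only [Finset.mem_filter] at h2
  exact h2.2

-- iterates stay submasks of f and increase

theorem iter_sub_f (f m : Nat) (hm : m &&& f = m) (k : Nat) :
    ((stepN f)^[k] m) &&& f = (stepN f)^[k] m := by
  induction k with
  | zero => simpa
  | succ k ih => rw [Function.iterate_succ_apply', step_sub_f]

theorem iter_incr (f m : Nat) (hm : m &&& f = m) (k : Nat) (i : Nat)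
    (hi : m.testBit i = true) : ((stepN f)^[k] m).testBit i = true := by
  induction k with
  | zero => simpa
  | succ k ih =>
    rw [Function.iterate_succ_apply']
    exact step_incr f _ (iter_sub_f f m hm k) i ih

theorem iter_incr_from (f m : Nat) (hm : m &&& f = m) (j k : Nat) (hjk : j ≤ k) (i : Nat)
    (hi : ((stepN f)^[j] m).testBit i = true) : ((stepN f)^[k] m).testBit i = true := by
  obtain ⟨d, rfl⟩ := Nat.exists_eq_add_of_le hjk
  rw [Nat.add_comm, Function.iterate_add_apply]
  exact iter_incr f _ (iter_sub_f f m hm j) d i hi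

theorem fixed_stays (f m : Nat) (hfix : stepN f m = m) (k : Nat) : (stepN f)^[k] m = m := by
  induction k with
  | zero => rfl
  | succ k ih => rw [Function.iterate_succ_apply', ih, hfix]

theorem cl_fixed (f m : Nat) (hf : f < 33554432) (hm : m &&& f = m) :
    stepN f (clN f m) = clN f m := by
  -- either some iterate ≤ 25 is fixed, or pc grows to 25
  by_cases hex : ∃ k, k ≤ 25 ∧ stepN f ((stepN f)^[k] m) = (stepN f)^[k] m
  · obtain ⟨k, hk, hfix⟩ := hex
    obtain ⟨d, hd⟩ := Nat.exists_eq_add_of_le hk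
    have h25 : (stepN f)^[25] m = (stepN f)^[d] ((stepN f)^[k] m) := by
      rw [hd, Nat.add_comm, Function.iterate_add_apply]
    unfold clN
    rw [h25, fixed_stays f _ hfix d, hfix]
  · push Not at hex
    have grow : ∀ k, k ≤ 25 → pcN m + k ≤ pcN ((stepN f)^[k] m) := by
      intro k
      induction k with
      | zero => simp
      | succ k ih =>
        intro hk
        have h1 := ih (by omega)
        have hne := hex k (by omega)
        have hsub := iter_sub_f f m hm k
        have hlt : pcN ((stepN f)^[k] m) < pcN ((stepN f)^[k+1] m) := by
          rw [Function.iterate_succ_apply']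
          exact pcN_lt_of_ssub (fun i hi => step_incr f _ hsub i hi) (fun h => hne h.symm)
            (sub_f_lt hf hsub) (step_lt f _ hf)
        omega
    have h25 := grow 25 le_rfl
    have hfull := pcN_full (sub_f_lt hf (iter_sub_f f m hm 25)) (by omega)
    apply absurd (hex 25 le_rfl)
    push Not
    apply Nat.eq_of_testBit_eq
    intro i
    by_cases hi : i < 25
    · rw [hfull i hi]
      exact step_incr f _ (iter_sub_f f m hm 25) i (hfull i hi)
    · rw [hi_bit_false (step_lt f _ hf) (by omega),
        hi_bit_false (sub_f_lt hf (iter_sub_f f m hm 25)) (by omega)]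

theorem and_one_testBit (n : Nat) : (n &&& 1 == 1) = n.testBit 0 := by
  have h1 : n &&& 1 = n % 2 := Nat.and_one_is_mod n
  rw [Nat.testBit_zero, h1]
  cases h : n % 2 == 1
  · have h' : ¬ n % 2 = 1 := fun hc => by rw [hc] at h; exact absurd h (by simp)
    simp [h']
  · have h' : n % 2 = 1 := beq_iff_eq.mp h
    simp [h']

theorem loopN_eq (f : Nat) (hf : f < 33554432) :
    ∀ (fuel : Nat) (m : Nat), m &&& f = m → 26 ≤ fuel + pcN m →
      loopN f fuel m = (clN f m).testBit 0 := by
  intro fuel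
  induction fuel with
  | zero =>
    intro m hm hfuel
    have := pcN_le m
    omega
  | succ fuel ih =>
    intro m hm hfuel
    simp only [loopN]
    have hstep_sub := step_sub_f f m
    have hm25 := sub_f_lt hf hm
    have hstep25 := step_lt f m hf
    rw [and_one_testBit]
    cases hbit : (stepN f m).testBit 0
    · rw [if_neg (by simp)]
      by_cases heq : m == stepN f m
      · rw [if_pos heq]
        have heq' : stepN f m = m := (beq_iff_eq.mp heq).symm
        have : clN f m = m := fixed_stays f m heq' 25
        rw [this]
        -- m.testBit 0 = false since stepN f m = m and its bit 0 is false
        rw [← heq', hbit]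
      · rw [if_neg heq]
        have hne : m ≠ stepN f m := fun h => heq (beq_iff_eq.mpr h)
        have hpc : pcN m < pcN (stepN f m) :=
          pcN_lt_of_ssub (step_incr f m hm) hne hm25 hstep25
        rw [ih (stepN f m) hstep_sub (by omega)]
        -- clN f (stepN f m) = clN f m
        unfold clN
        rw [← Function.iterate_succ_apply]
        have hfix := cl_fixed f m hf hm
        unfold clN at hfix
        rw [Function.iterate_succ_apply', hfix]
    · have : (clN f m).testBit 0 = true := by
        unfold clN
        exact iter_incr_from f m hm 1 25 (by omega) 0 (by simpa using hbit)
      simp [this]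

-- ---- one step of the mask iteration is grid adjacency ----
theorem C0_bit : ∀ p, p < 25 → ((16236015:Nat).testBit p = decide (p % 5 ≠ 4)) := by decide

theorem C2_bit : ∀ p, p < 25 → ((32472030:Nat).testBit p = decide (p % 5 ≠ 0)) := by decide

theorem step_bit (f m p : Nat) (hm : m < 33554432) (hp : p < 25) :
    ((stepN f m).testBit p = true) ↔ (f.testBit p = true ∧ (m.testBit p = true ∨
      (5 ≤ p ∧ m.testBit (p - 5) = true) ∨ (p + 5 < 25 ∧ m.testBit (p + 5) = true) ∨
      (p % 5 ≠ 0 ∧ m.testBit (p - 1) = true) ∨ (p % 5 ≠ 4 ∧ m.testBit (p + 1) = true))) := by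
  have h10 : p % 5 ≠ 0 → 1 ≤ p := by omega
  have h14 : p % 5 ≠ 4 → p + 1 < 25 ∨ True := fun _ => Or.inr trivial
  have hc0 := C0_bit p hp
  have hc2 := C2_bit p hp
  have hmask := mask25_bit p
  have hsr1 : (m >>> 1).testBit p = m.testBit (p + 1) := by
    rw [Nat.testBit_shiftRight, Nat.add_comm]
  have hsr5 : (m >>> 5).testBit p = m.testBit (p + 5) := by
    rw [Nat.testBit_shiftRight, Nat.add_comm]
  have hp5 : ¬ (p + 5 < 25) → m.testBit (p + 5) = false := fun h =>
    hi_bit_false hm (by omega)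
  simp only [stepN, orAllN, Nat.testBit_and, Nat.testBit_or, Nat.testBit_shiftLeft,
    hsr1, hsr5, hc0, hc2, hmask, Bool.and_eq_true, Bool.or_eq_true, decide_eq_true_eq, hp]
  constructor
  · rintro ⟨hor, hf⟩
    refine ⟨hf, ?_⟩
    rcases hor with ((((h | h) | h) | h) | h)
    · exact Or.inl h
    · exact Or.inr (Or.inr (Or.inr (Or.inr ⟨h.2, h.1⟩)))
    · exact Or.inr (Or.inl ⟨h.1.1, h.1.2⟩)
    · exact Or.inr (Or.inr (Or.inr (Or.inl ⟨h.2, h.1.2⟩)))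
    · by_cases h5 : p + 5 < 25
      · exact Or.inr (Or.inr (Or.inl ⟨h5, h⟩))
      · rw [hp5 h5] at h; exact absurd h (by simp)
  · rintro ⟨hf, hor⟩
    refine ⟨?_, hf⟩
    rcases hor with (h | ⟨h1, h2⟩ | ⟨h1, h2⟩ | ⟨h1, h2⟩ | ⟨h1, h2⟩)
    · exact Or.inl (Or.inl (Or.inl (Or.inl h)))
    · exact Or.inl (Or.inl (Or.inr ⟨⟨h1, h2⟩, by simp⟩))
    · exact Or.inr h2
    · exact Or.inl (Or.inr ⟨⟨h10 h1, h2⟩, h1⟩)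
    · exact Or.inl (Or.inl (Or.inl (Or.inr ⟨h2, h1⟩)))

-- ---- port B: free-cell test reads the same bits ----
theorem isFree_bit (maze : Int) : ∀ (q : Int), 0 ≤ q → q < 25 →
    isFreeB maze q = (fN maze).testBit q.toNat := by
  intro q h0 h25
  interval_cases q <;>
  · simp only [isFreeB, fN, PySem.Int.band_one,
      PySem.Int.mod_eq_emod_of_pos (by norm_num : (0:Int) < 2),
      Int.shiftRight_eq_div_pow, Int.reduceToNat]
    rw [Nat.testBit_eq_decide_div_mod_eq]
    apply Bool.eq_iff_iff.mpr
    simp only [beq_iff_eq, decide_eq_true_eq]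
    have hre : (33554431 - maze).emod 33554432 = (33554431 - maze) % 33554432 := rfl
    rw [hre]
    norm_num
    omega

-- ---- DFS invariants ----
theorem m0_sub_f (maze : Int) : (16777216 &&& fN maze) &&& fN maze = 16777216 &&& fN maze := by
  rw [Nat.and_assoc, Nat.and_self]

theorem clM_sub_f (maze : Int) : clM maze &&& fN maze = clM maze :=
  iter_sub_f _ _ (m0_sub_f maze) 25

theorem clM_lt (maze : Int) : clM maze < 33554432 :=
  sub_f_lt (fN_lt maze) (clM_sub_f maze)

theorem sound (maze : Int) {p i : Nat} (hp : p < 25) (hi : i < 25) (ha : adjP p i)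
    (hf : (fN maze).testBit i = true) (hc : (clM maze).testBit p = true) :
    (clM maze).testBit i = true := by
  have hfix := cl_fixed (fN maze) (16777216 &&& fN maze) (fN_lt maze) (m0_sub_f maze)
  have h := (step_bit (fN maze) (clM maze) i (clM_lt maze) hi).mpr
  rw [show stepN (fN maze) (clM maze) = clM maze from hfix] at h
  apply h
  refine ⟨hf, Or.inr ?_⟩
  rcases ha with ⟨h5, rfl⟩ | ⟨h5, rfl⟩ | ⟨h5, rfl⟩ | ⟨h5, rfl⟩
  · refine Or.inr (Or.inl ⟨by omega, ?_⟩)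
    rw [show p - 5 + 5 = p by omega]; exact hc
  · refine Or.inl ⟨by omega, ?_⟩
    rw [show p + 5 - 5 = p by omega]; exact hc
  · refine Or.inr (Or.inr (Or.inr ⟨by omega, ?_⟩))
    rw [show p - 1 + 1 = p by omega]; exact hc
  · refine Or.inr (Or.inr (Or.inl ⟨by omega, ?_⟩))
    rw [show p + 1 - 1 = p by omega]; exact hc

theorem fold_inv (maze : Int) (L : List (Int × Int))
    (hL : ∀ x ∈ L, 0 ≤ x.1 → x.1 < 5 → 0 ≤ x.2 → x.2 < 5 →
      (fN maze).testBit (x.1 * 5 + x.2).toNat = true →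
      (clM maze).testBit (x.1 * 5 + x.2).toNat = true) :
    ∀ st : List Int × PySem.Set Int,
    st.2.Nodup → (∀ a ∈ st.1, a ∈ st.2) →
    (∀ a ∈ st.2, 0 ≤ a ∧ a < 25 ∧ (clM maze).testBit a.toNat = true) →
    ((L.foldl (dfsUpd maze) st).2.Nodup ∧
     (∀ a ∈ (L.foldl (dfsUpd maze) st).1, a ∈ (L.foldl (dfsUpd maze) st).2) ∧
     (∀ a ∈ (L.foldl (dfsUpd maze) st).2, 0 ≤ a ∧ a < 25 ∧ (clM maze).testBit a.toNat = true) ∧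
     (∀ a ∈ st.2, a ∈ (L.foldl (dfsUpd maze) st).2) ∧
     (∀ a ∈ st.1, a ∈ (L.foldl (dfsUpd maze) st).1) ∧
     (L.foldl (dfsUpd maze) st).1.length + st.2.length
        = st.1.length + (L.foldl (dfsUpd maze) st).2.length ∧
     (∀ a ∈ (L.foldl (dfsUpd maze) st).2, a ∈ st.2 ∨ a ∈ (L.foldl (dfsUpd maze) st).1) ∧
     (∀ x ∈ L, 0 ≤ x.1 → x.1 < 5 → 0 ≤ x.2 → x.2 < 5 → isFreeB maze (x.1 * 5 + x.2) = true →
        (x.1 * 5 + x.2) ∈ (L.foldl (dfsUpd maze) st).2)) := by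
  induction L with
  | nil =>
    intro st h1 h2 h3
    simp only [List.foldl_nil]
    exact ⟨h1, h2, h3, fun a ha => ha, fun a ha => ha, trivial, fun a ha => Or.inl ha, by simp⟩
  | cons x L ih =>
    intro st h1 h2 h3
    simp only [List.foldl_cons]
    by_cases hinb : 0 ≤ x.1 ∧ x.1 < 5 ∧ 0 ≤ x.2 ∧ x.2 < 5
    · have hq0 : 0 ≤ x.1 * 5 + x.2 := by obtain ⟨a,b,c,d⟩ := hinb; nlinarith
      have hq25 : x.1 * 5 + x.2 < 25 := by obtain ⟨a,b,c,d⟩ := hinb; nlinarith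
      cases hfree : (isFreeB maze (x.1 * 5 + x.2) && !(PySem.Set.contains st.2 (x.1 * 5 + x.2))) with
      | true =>
        have hupd : dfsUpd maze st x = (st.1 ++ [x.1 * 5 + x.2], PySem.Set.add st.2 (x.1 * 5 + x.2)) := by
          rw [dfsUpd, if_pos hinb, hfree]; simp
        rw [hupd]
        have hfr : isFreeB maze (x.1 * 5 + x.2) = true := by
          cases h : isFreeB maze (x.1 * 5 + x.2)
          · rw [h] at hfree; simp at hfree
          · rfl
        have hnotmem : (x.1 * 5 + x.2) ∉ st.2 := by
          intro hmem
          rw [hfr, (PySem.Set.contains_iff st.2 _).mpr hmem] at hfree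
          simp at hfree
        have hgood : (clM maze).testBit (x.1 * 5 + x.2).toNat = true := by
          apply hL x (by simp) hinb.1 hinb.2.1 hinb.2.2.1 hinb.2.2.2
          rw [← isFree_bit maze _ hq0 hq25]; exact hfr
        have h1' : (PySem.Set.add st.2 (x.1 * 5 + x.2)).Nodup := PySem.Set.nodup_add st.2 _ h1
        have h2' : ∀ a ∈ st.1 ++ [x.1 * 5 + x.2], a ∈ PySem.Set.add st.2 (x.1 * 5 + x.2) := by
          intro a ha
          rcases List.mem_append.mp ha with ha | ha
          · exact (PySem.Set.mem_add _ _ _).mpr (Or.inl (h2 a ha))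
          · exact (PySem.Set.mem_add _ _ _).mpr (Or.inr (List.mem_singleton.mp ha))
        have h3' : ∀ a ∈ PySem.Set.add st.2 (x.1 * 5 + x.2), 0 ≤ a ∧ a < 25 ∧ (clM maze).testBit a.toNat = true := by
          intro a ha
          rcases (PySem.Set.mem_add _ _ _).mp ha with ha | rfl
          · exact h3 a ha
          · exact ⟨hq0, hq25, hgood⟩
        obtain ⟨i1, i2, i3, i4, i5, i6, i7, i8⟩ := ih (fun y hy => hL y (by simp [hy]))
          (st.1 ++ [x.1 * 5 + x.2], PySem.Set.add st.2 (x.1 * 5 + x.2)) h1' h2' h3'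
        have hlenadd : (PySem.Set.add st.2 (x.1 * 5 + x.2)).length = st.2.length + 1 := by
          rw [PySem.Set.add_of_not_mem hnotmem, List.length_append, List.length_singleton]
        refine ⟨i1, i2, i3, ?_, ?_, ?_, ?_, ?_⟩
        · intro a ha; exact i4 a ((PySem.Set.mem_add _ _ _).mpr (Or.inl ha))
        · intro a ha; exact i5 a (List.mem_append.mpr (Or.inl ha))
        · simp only [List.length_append, List.length_singleton] at i6 ⊢
          omega
        · intro a ha
          rcases i7 a ha with hn | hn
          · rcases (PySem.Set.mem_add _ _ _).mp hn with hn' | rfl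
            · exact Or.inl hn'
            · exact Or.inr (i5 _ (List.mem_append.mpr (Or.inr (List.mem_singleton.mpr rfl))))
          · exact Or.inr hn
        · intro y hy hy1 hy2 hy3 hy4 hyfree
          rcases List.mem_cons.mp hy with rfl | hy
          · exact i4 _ ((PySem.Set.mem_add _ _ _).mpr (Or.inr rfl))
          · exact i8 y hy hy1 hy2 hy3 hy4 hyfree
      | false =>
        have hupd : dfsUpd maze st x = st := by
          rw [dfsUpd, if_pos hinb, hfree]; simp
        rw [hupd]
        obtain ⟨i1, i2, i3, i4, i5, i6, i7, i8⟩ := ih (fun y hy => hL y (by simp [hy])) st h1 h2 h3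
        refine ⟨i1, i2, i3, i4, i5, i6, i7, ?_⟩
        intro y hy hy1 hy2 hy3 hy4 hyfree
        rcases List.mem_cons.mp hy with rfl | hy
        · -- head: not pushed because already in seen
          have : PySem.Set.contains st.2 (y.1 * 5 + y.2) = true := by
            cases hc : PySem.Set.contains st.2 (y.1 * 5 + y.2)
            · rw [hyfree, hc] at hfree; simp at hfree
            · rfl
          exact i4 _ ((PySem.Set.contains_iff _ _).mp this)
        · exact i8 y hy hy1 hy2 hy3 hy4 hyfree
    · have hupd : dfsUpd maze st x = st := by rw [dfsUpd, if_neg hinb]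
      rw [hupd]
      obtain ⟨i1, i2, i3, i4, i5, i6, i7, i8⟩ := ih (fun y hy => hL y (by simp [hy])) st h1 h2 h3
      refine ⟨i1, i2, i3, i4, i5, i6, i7, ?_⟩
      intro y hy hy1 hy2 hy3 hy4 hyfree
      rcases List.mem_cons.mp hy with rfl | hy
      · exact absurd ⟨hy1, hy2, hy3, hy4⟩ hinb
      · exact i8 y hy hy1 hy2 hy3 hy4 hyfree

theorem seen_le (seen : List Int) (hnd : seen.Nodup) (hb : ∀ a ∈ seen, 0 ≤ a ∧ a < 25) :
    seen.length ≤ 25 := by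
  classical
  have h1 : seen.toFinset.card = seen.length := List.toFinset_card_of_nodup hnd
  have h2 : seen.toFinset ⊆ Finset.Icc (0:Int) 24 := by
    intro a ha
    rw [List.mem_toFinset] at ha
    have := hb a ha
    rw [Finset.mem_Icc]
    omega
  have h3 := Finset.card_le_card h2
  have h4 : (Finset.Icc (0:Int) 24).card = 25 := by rw [Int.card_Icc]; rfl
  omega

theorem m0_bit (maze : Int) (i : Nat) :
    (16777216 &&& fN maze).testBit i = (decide (i = 24) && (fN maze).testBit i) := by
  rw [Nat.testBit_and, show (16777216:Nat) = 2^24 by norm_num, Nat.testBit_two_pow]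
  simp [eq_comm]

theorem dfs_main (maze : Int) :
    ∀ (fuel : Nat) (stack : List Int) (seen : PySem.Set Int),
    seen.Nodup → (∀ a ∈ stack, a ∈ seen) →
    (∀ a ∈ seen, 0 ≤ a ∧ a < 25 ∧ (clM maze).testBit a.toNat = true) →
    ((24:Int) ∈ seen) →
    (∀ p ∈ seen, p ∉ stack → ∀ i : Nat, i < 25 → adjP p.toNat i →
       (fN maze).testBit i = true → ((i:Int) ∈ seen)) →
    25 + stack.length < fuel + seen.length →
    dfsLoop maze fuel stack seen = (clM maze).testBit 0 := by
  intro fuel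
  induction fuel with
  | zero =>
    intro stack seen h1 h2 h3 h4 h5 hfuel
    have := seen_le seen h1 (fun a ha => ⟨(h3 a ha).1, (h3 a ha).2.1⟩)
    omega
  | succ fuel ih =>
    intro stack seen h1 h2 h3 h4 h5 hfuel
    cases hlast : stack.getLast? with
    | none =>
      have hnil : stack = [] := List.getLast?_eq_none_iff.mp hlast
      simp only [dfsLoop, hlast]
      -- completeness: every cell of every iterate is in seen
      have comp : ∀ (j : Nat) (i : Nat), i < 25 →
          ((stepN (fN maze))^[j] (16777216 &&& fN maze)).testBit i = true → ((i:Int) ∈ seen) := by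
        intro j
        induction j with
        | zero =>
          intro i hi hbit
          simp only [Function.iterate_zero, id] at hbit
          rw [m0_bit] at hbit
          obtain ⟨he, -⟩ := Bool.and_eq_true_iff.mp hbit
          have : i = 24 := of_decide_eq_true he
          subst this
          exact_mod_cast h4
        | succ j ihj =>
          intro i hi hbit
          rw [Function.iterate_succ_apply'] at hbit
          have hsub := iter_sub_f (fN maze) (16777216 &&& fN maze) (m0_sub_f maze) j
          obtain ⟨hfi, hor⟩ := (step_bit (fN maze) _ i (sub_f_lt (fN_lt maze) hsub) hi).mp hbit
          rcases hor with h | ⟨hc, hb⟩ | ⟨hc, hb⟩ | ⟨hc, hb⟩ | ⟨hc, hb⟩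
          · exact ihj i hi h
          · have hmem := ihj (i - 5) (by omega) hb
            have := h5 _ hmem (by rw [hnil]; simp) i hi (by
              rw [Int.toNat_natCast]
              right; left; exact ⟨by omega, by omega⟩) hfi
            exact this
          · have hmem := ihj (i + 5) (by omega) hb
            have := h5 _ hmem (by rw [hnil]; simp) i hi (by
              rw [Int.toNat_natCast]
              left; exact ⟨by omega, by omega⟩) hfi
            exact this
          · have hmem := ihj (i - 1) (by omega) hb
            have := h5 _ hmem (by rw [hnil]; simp) i hi (by
              rw [Int.toNat_natCast]
              right; right; right; exact ⟨by omega, by omega⟩) hfi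
            exact this
          · have hmem := ihj (i + 1) (by omega) hb
            have := h5 _ hmem (by rw [hnil]; simp) i hi (by
              rw [Int.toNat_natCast]
              right; right; left; exact ⟨by omega, by omega⟩) hfi
            exact this
      cases hcl : (clM maze).testBit 0 with
      | true =>
        have h0 : ((0:Nat):Int) ∈ seen := comp 25 0 (by omega) hcl
        rw [(PySem.Set.contains_iff seen 0).mpr (by exact_mod_cast h0)]
      | false =>
        cases hc : PySem.Set.contains seen 0 with
        | false => rfl
        | true =>
          have h0 : (0:Int) ∈ seen := (PySem.Set.contains_iff seen 0).mp hc
          have := (h3 0 h0).2.2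
          rw [show ((0:Int)).toNat = 0 from rfl] at this
          rw [this] at hcl
          exact absurd hcl (by simp)
    | some p =>
      have hstack : stack.dropLast ++ [p] = stack := List.dropLast_append_getLast? p hlast
      have hpstack : p ∈ stack := by rw [← hstack]; simp
      have hpseen : p ∈ seen := h2 p hpstack
      obtain ⟨hp0, hp25, hpcl⟩ := h3 p hpseen
      have hpnat : p = ((p.toNat : Nat) : Int) := by omega
      have hpn25 : p.toNat < 25 := by omega
      have hr : PySem.Int.floordiv p 5 = ((p.toNat / 5 : Nat) : Int) := by
        rw [hpnat]; exact_mod_cast PySem.Int.floordiv_natCast p.toNat 5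
      have hc : PySem.Int.mod p 5 = ((p.toNat % 5 : Nat) : Int) := by
        rw [hpnat]; exact_mod_cast PySem.Int.mod_natCast p.toNat 5
      simp only [dfsLoop, hlast]
      set L := [(PySem.Int.floordiv p 5 - 1, PySem.Int.mod p 5),
                 (PySem.Int.floordiv p 5 + 1, PySem.Int.mod p 5),
                 (PySem.Int.floordiv p 5, PySem.Int.mod p 5 - 1),
                 (PySem.Int.floordiv p 5, PySem.Int.mod p 5 + 1)] with hL
      have hdiv : (p.toNat / 5) * 5 + p.toNat % 5 = p.toNat := by omega
      -- each in-bounds free target of L is good (via soundness from p)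
      have hLgood : ∀ x ∈ L, 0 ≤ x.1 → x.1 < 5 → 0 ≤ x.2 → x.2 < 5 →
          (fN maze).testBit (x.1 * 5 + x.2).toNat = true →
          (clM maze).testBit (x.1 * 5 + x.2).toNat = true := by
        intro x hx hx1 hx2 hx3 hx4 hfree
        have hadj : adjP p.toNat (x.1 * 5 + x.2).toNat ∧ (x.1 * 5 + x.2).toNat < 25 := by
          rw [hL] at hx
          simp only [List.mem_cons, List.not_mem_nil, or_false] at hx
          rcases hx with hxe | hxe | hxe | hxe <;>
            (rw [hxe] at hx1 hx2 hx3 hx4 ⊢; rw [hr, hc] at hx1 hx2 hx3 hx4 ⊢; unfold adjP; omega)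
        exact sound maze hpn25 hadj.2 hadj.1 hfree hpcl
      have hsub0 : ∀ a ∈ stack.dropLast, a ∈ seen := by
        intro a ha
        apply h2
        rw [← hstack]
        exact List.mem_append.mpr (Or.inl ha)
      obtain ⟨i1, i2, i3, i4, i5, i6, i7, i8⟩ :=
        fold_inv maze L hLgood (stack.dropLast, seen) h1 hsub0 h3
      apply ih _ _ i1 i2 i3 (i4 24 h4)
      · -- closure invariant for the new state
        intro p' hp'seen hp'stack i hi hadj hfi
        rcases i7 p' hp'seen with hp'old | hp'new
        · by_cases hpp : p' = p
          · subst hpp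
            -- targets of the popped cell are covered by the fold
            rcases hadj with ⟨h5', rfl⟩ | ⟨h5', rfl⟩ | ⟨h5', rfl⟩ | ⟨h5', rfl⟩
            · have := i8 (PySem.Int.floordiv p' 5 - 1, PySem.Int.mod p' 5) (by rw [hL]; simp)
                (by rw [hr]; simp; omega) (by rw [hr]; simp; omega)
                (by rw [hc]; simp; omega) (by rw [hc]; simp; omega)
              have htgt : (PySem.Int.floordiv p' 5 - 1) * 5 + PySem.Int.mod p' 5 = ((p'.toNat - 5 : Nat) : Int) := by
                rw [hr, hc]; push_cast; omega
              rw [htgt] at this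
              apply this
              rw [isFree_bit maze _ (by omega) (by omega), Int.toNat_natCast]
              exact hfi
            · have := i8 (PySem.Int.floordiv p' 5 + 1, PySem.Int.mod p' 5) (by rw [hL]; simp)
                (by rw [hr]; simp; omega) (by rw [hr]; simp; omega)
                (by rw [hc]; simp; omega) (by rw [hc]; simp; omega)
              have htgt : (PySem.Int.floordiv p' 5 + 1) * 5 + PySem.Int.mod p' 5 = ((p'.toNat + 5 : Nat) : Int) := by
                rw [hr, hc]; push_cast; omega
              rw [htgt] at this
              apply this
              rw [isFree_bit maze _ (by omega) (by omega), Int.toNat_natCast]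
              exact hfi
            · have := i8 (PySem.Int.floordiv p' 5, PySem.Int.mod p' 5 - 1) (by rw [hL]; simp)
                (by rw [hr]; simp; omega) (by rw [hr]; simp; omega)
                (by rw [hc]; simp; omega) (by rw [hc]; simp; omega)
              have htgt : (PySem.Int.floordiv p' 5) * 5 + (PySem.Int.mod p' 5 - 1) = ((p'.toNat - 1 : Nat) : Int) := by
                rw [hr, hc]; push_cast; omega
              rw [htgt] at this
              apply this
              rw [isFree_bit maze _ (by omega) (by omega), Int.toNat_natCast]
              exact hfi
            · have := i8 (PySem.Int.floordiv p' 5, PySem.Int.mod p' 5 + 1) (by rw [hL]; simp)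
                (by rw [hr]; simp; omega) (by rw [hr]; simp; omega)
                (by rw [hc]; simp; omega) (by rw [hc]; simp; omega)
              have htgt : (PySem.Int.floordiv p' 5) * 5 + (PySem.Int.mod p' 5 + 1) = ((p'.toNat + 1 : Nat) : Int) := by
                rw [hr, hc]; push_cast; omega
              rw [htgt] at this
              apply this
              rw [isFree_bit maze _ (by omega) (by omega), Int.toNat_natCast]
              exact hfi
          · -- p' was already closed before the pop
            have hp'notstack : p' ∉ stack := by
              intro hmem
              rw [← hstack] at hmem
              rcases List.mem_append.mp hmem with hmem | hmem
              · exact hp'stack (i5 p' hmem)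
              · exact hpp (List.mem_singleton.mp hmem)
            exact i4 _ (h5 p' hp'old hp'notstack i hi hadj hfi)
        · exact absurd hp'new hp'stack
      · -- fuel accounting
        have hlen : stack.dropLast.length + 1 = stack.length := by
          rw [← hstack]; simp
        have i6' : (L.foldl (dfsUpd maze) (stack.dropLast, seen)).1.length + seen.length
            = stack.dropLast.length + (L.foldl (dfsUpd maze) (stack.dropLast, seen)).2.length := i6
        omega

theorem dfsLoop30 (maze : Int) (hstart : (fN maze).testBit 24 = true) :
    dfsLoop maze 30 [24] (PySem.Set.ofList [24]) = (clM maze).testBit 0 := by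
  have hofl : PySem.Set.ofList [(24:Int)] = [24] := rfl
  rw [hofl]
  have hcl24 : (clM maze).testBit 24 = true := by
    apply iter_incr _ _ (m0_sub_f maze) 25
    rw [m0_bit]
    simp [hstart]
  apply dfs_main maze 30 [24] [24]
  · simp
  · intro a ha; exact ha
  · intro a ha
    rcases List.mem_singleton.mp ha with rfl
    exact ⟨by norm_num, by norm_num, by rw [show ((24:Int)).toNat = 24 from rfl]; exact hcl24⟩
  · simp
  · intro p hp hnp i hi hadj hfi
    rcases List.mem_singleton.mp hp with rfl
    exact absurd (List.mem_singleton.mpr rfl) hnp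
  · simp

theorem orAllN_zero : orAllN 0 = 0 := rfl

theorem cl_zero (maze : Int) (hstart : (fN maze).testBit 24 = false) : clM maze = 0 := by
  have hm0 : 16777216 &&& fN maze = 0 := by
    apply Nat.eq_of_testBit_eq
    intro i
    rw [m0_bit, Nat.zero_testBit]
    by_cases hi : i = 24
    · subst hi; simp [hstart]
    · simp [hi]
  have hstep0 : stepN (fN maze) 0 = 0 := by
    rw [stepN, orAllN_zero, Nat.zero_and]
  unfold clM clN
  rw [hm0, fixed_stays _ _ hstep0 25]

theorem enable_alt_eq (maze : Int) : enable_alt maze = (clM maze).testBit 0 := by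
  unfold enable_alt
  have h24 := isFree_bit maze 24 (by norm_num) (by norm_num)
  rw [show ((24:Int)).toNat = 24 from rfl] at h24
  cases hstart : (fN maze).testBit 24 with
  | false =>
    rw [h24, hstart, cl_zero maze hstart]
    simp
  | true =>
    rw [h24, hstart]
    simpa using dfsLoop30 maze hstart

theorem enable_eq (maze : Int) : enable maze = (clM maze).testBit 0 := by
  rw [enable_eq_loopN maze]
  exact loopN_eq (fN maze) (fN_lt maze) 26 _ (m0_sub_f maze) (Nat.le_add_right 26 _)

-- ===== VERDICT (by name: the statement is the Claim_ definition above) =====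
theorem enable_spec : Claim_equal_enable := by
  intro maze _
  unfold Spec_enable
  rw [enable_eq maze, enable_alt_eq maze]
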